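-- pv_equiv track=rewrite | github.com/archer-baiyi/CTF-Crypto-Algorithms | RSA/low exponent/Wiener/wiener_attack.py | wiener_attack
-- ===== SOURCE A (Python) =====
-- import math
--
-- def continued_fraction(numerator, denominator):
--     """Generate the continued fraction expansion of numerator/denominator."""
--     cf = []
--     while denominator:
--         a = numerator // denominator
--         cf.append(a)
--         numerator, denominator = denominator, numerator - a * denominator
--     return cf
--
-- def convergents_from_cf(cf):
--     """Generate convergents (k, d) from a continued fraction sequence cf."""
--     n0, d0 = cf[0], 1
--     yield (n0, 1)
--     if len(cf) == 1:
--         return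
--     n1 = cf[1] * cf[0] + 1
--     d1 = cf[1]
--     yield (n1, d1)
--     for i in range(2, len(cf)):
--         ni = cf[i] * n1 + n0
--         di = cf[i] * d1 + d0
--         yield (ni, di)
--         n0, d0, n1, d1 = n1, d1, ni, di
--
-- def is_perfect_square(x):
--     """Check whether x is a perfect square."""
--     if x < 0:
--         return False
--     s = math.isqrt(x)
--     return s * s == x
--
-- def wiener_attack(e, n):
--     """
--     Attempt to recover the RSA private exponent d using Wiener's attack.
--
--     Args:
--         e: Public exponent
--         n: Modulus
--
--     Returns:
--         If successful, returns the private exponent d; otherwise returns None.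
--     """
--     cf = continued_fraction(e, n)
--     for k, d in convergents_from_cf(cf):
--         if k == 0:
--             continue
--
--         # Check whether (e*d - 1) is divisible by k to derive phi
--         if (e * d - 1) % k != 0:
--             continue
--         phi = (e * d - 1) // k
--
--         # Discriminant of x^2 - (n - phi + 1)x + n = 0
--         s = n - phi + 1
--         discr = s * s - 4 * n
--
--         if discr >= 0 and is_perfect_square(discr):
--             t = math.isqrt(discr)
--
--             # Recover p and q
--             p = (s + t) // 2
--             q = (s - t) // 2
--             if p * q == n:
--                 return d
--
--     return None
-- ===== SOURCE B (Python) =====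
-- import math
--
-- def wiener_attack(e, n):
--     """Wiener's attack where each convergent k/d of e/n is obtained by
--     evaluating the continued-fraction prefix cf[:i+1] BACK TO FRONT
--     (p, q <- a*p + q, p), instead of the forward h/k recurrence: by the
--     continuant identity K(a0..ai) = a0*K(a1..ai) + K(a2..ai), the back
--     substitution yields exactly the canonical convergent pair (k, d)."""
--     cf = []
--     num, den = e, n
--     while den:
--         a = num // den
--         cf.append(a)
--         num, den = den, num - a * den
--     for i in range(len(cf)):
--         # evaluate [cf[0]; cf[1], ..., cf[i]] from the innermost term out
--         k, d = cf[i], 1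
--         for j in range(i - 1, -1, -1):
--             k, d = cf[j] * k + d, k
--         if k == 0:
--             continue
--         if (e * d - 1) % k != 0:
--             continue
--         phi = (e * d - 1) // k
--         s = n - phi + 1
--         discr = s * s - 4 * n
--         if discr >= 0:
--             t = math.isqrt(discr)
--             if t * t == discr:
--                 p = (s + t) // 2
--                 q = (s - t) // 2
--                 if p * q == n:
--                     return d
--     return None
-- ===== Notes on version B (the rewrite author's own statement) =====
-- stated objective: alternative
-- what changed: B drops the forward h/k convergent recurrence and generator: for each continued-fraction prefix it evaluates the convergent pair (k, d) back to front via the continuant identity (p, q <- a*p + q, p), testing each candidate in place.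
-- outside the precondition, e.g. on wiener_attack(17, 0): A raises IndexError, B returns None
-- crash fix: For n == 0 A raises IndexError (cf[0] on the empty continued fraction) while B's prefix loop has nothing to iterate and returns None. — e.g. on wiener_attack(17, 0): A raises IndexError, B returns none
import Mathlib
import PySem

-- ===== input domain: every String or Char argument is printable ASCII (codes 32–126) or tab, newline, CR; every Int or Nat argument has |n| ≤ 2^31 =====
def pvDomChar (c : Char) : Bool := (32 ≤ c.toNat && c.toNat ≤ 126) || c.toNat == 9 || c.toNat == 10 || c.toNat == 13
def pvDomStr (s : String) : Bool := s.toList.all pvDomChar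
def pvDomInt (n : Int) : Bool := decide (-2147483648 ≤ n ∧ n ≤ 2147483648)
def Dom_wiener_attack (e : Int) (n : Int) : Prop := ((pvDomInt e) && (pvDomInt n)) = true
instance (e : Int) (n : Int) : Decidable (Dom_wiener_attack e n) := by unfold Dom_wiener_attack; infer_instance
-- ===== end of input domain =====

-- B replaces the forward convergent recurrence/generator by a back-to-front evaluation of
-- each continued-fraction prefix (continuant identity); alternative algorithm, return values only.

-- termination helper: one Euclid step strictly shrinks |denominator|
theorem pvEuclidStep_lt (num den : Int) (h : den ≠ 0) :
    (num - PySem.Int.floordiv num den * den).natAbs < den.natAbs := by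
  have hm : PySem.Int.floordiv num den * den + PySem.Int.mod num den = num :=
    PySem.Int.floordiv_mul_add_mod num den
  have : num - PySem.Int.floordiv num den * den = PySem.Int.mod num den := by omega
  rw [this]
  rcases lt_or_gt_of_ne h with hneg | hpos
  · have := PySem.Int.mod_neg_bounds (a := num) hneg
    omega
  · have h1 := PySem.Int.mod_nonneg (a := num) hpos
    have h2 := PySem.Int.mod_lt (a := num) hpos
    omega

-- ===== PORT A =====
-- continued_fraction(numerator, denominator)
def cfA (num den : Int) : List Int :=
  if h : den = 0 then []
  else
    let a := PySem.Int.floordiv num den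
    a :: cfA den (num - a * den)
termination_by den.natAbs
decreasing_by exact pvEuclidStep_lt num den h

-- convergents_from_cf: the generator's `for i in range(2, len(cf))` tail
def convRestA (cf : List Int) (n1 d1 n0 d0 : Int) : List (Int × Int) :=
  match cf with
  | [] => []
  | a :: t =>
    let ni := a * n1 + n0
    let di := a * d1 + d0
    (ni, di) :: convRestA t ni di n1 d1

-- convergents_from_cf(cf) as the list it yields; on [] Python raises IndexError (cf[0]): excluded via Pre_
def convA (cf : List Int) : List (Int × Int) :=
  match cf with
  | [] => []
  | [a0] => [(a0, 1)]
  | a0 :: a1 :: rest => (a0, 1) :: (a1 * a0 + 1, a1) :: convRestA rest (a1 * a0 + 1) a1 a0 1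

-- is_perfect_square(x); math.isqrt is exact for x ≥ 0 as Nat.sqrt
def isPerfectSquareA (x : Int) : Bool :=
  if x < 0 then false
  else
    let s : Int := (Nat.sqrt x.toNat : Int)
    s * s == x

-- the `for k, d in convergents_from_cf(cf)` loop with its continue/return logic
def scanA (e n : Int) : List (Int × Int) → Option Int
  | [] => none
  | (k, d) :: rest =>
    if k = 0 then scanA e n rest
    else if PySem.Int.mod (e * d - 1) k ≠ 0 then scanA e n rest
    else
      let phi := PySem.Int.floordiv (e * d - 1) k
      let s := n - phi + 1
      let discr := s * s - 4 * n
      if 0 ≤ discr ∧ isPerfectSquareA discr = true then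
        let t : Int := (Nat.sqrt discr.toNat : Int)
        let p := PySem.Int.floordiv (s + t) 2
        let q := PySem.Int.floordiv (s - t) 2
        if p * q = n then some d else scanA e n rest
      else scanA e n rest

def wiener_attack (e : Int) (n : Int) : Option Int :=
  scanA e n (convA (cfA e n))

-- ===== PORT B =====
-- Source B's inline continued-fraction loop (same Euclid loop text as A's helper)
def cfB (num den : Int) : List Int :=
  if h : den = 0 then []
  else
    let a := PySem.Int.floordiv num den
    a :: cfB den (num - a * den)
termination_by den.natAbs
decreasing_by exact pvEuclidStep_lt num den h

-- Source B's inner loop `for j in range(i-1, -1, -1): k, d = cf[j]*k + d, k`: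
-- rev holds cf[i-1], cf[i-2], ..., cf[0] in that processing order
def backB : List Int → Int → Int → Int × Int
  | [], k, d => (k, d)
  | a :: t, k, d => backB t (a * k + d) k

-- Source B's outer loop over prefixes cf[:i+1]; rev accumulates the prefix in reverse
def scanB (e n : Int) : List Int → List Int → Option Int
  | _, [] => none
  | rev, a :: rest =>
    let kd := backB rev a 1
    let k := kd.1
    let d := kd.2
    if k = 0 then scanB e n (a :: rev) rest
    else if PySem.Int.mod (e * d - 1) k ≠ 0 then scanB e n (a :: rev) rest
    else
      let phi := PySem.Int.floordiv (e * d - 1) k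
      let s := n - phi + 1
      let discr := s * s - 4 * n
      if 0 ≤ discr then
        let t : Int := (Nat.sqrt discr.toNat : Int)
        if t * t = discr then
          let p := PySem.Int.floordiv (s + t) 2
          let q := PySem.Int.floordiv (s - t) 2
          if p * q = n then some d else scanB e n (a :: rev) rest
        else scanB e n (a :: rev) rest
      else scanB e n (a :: rev) rest

def wiener_attack_alt (e : Int) (n : Int) : Option Int :=
  scanB e n [] (cfB e n)

-- ===== PRECONDITION & SPEC =====
-- Pre_ excludes exactly n == 0, where Python A raises IndexError (cf[0] on the empty continued fraction)
def Pre_wiener_attack (e : Int) (n : Int) : Prop := n ≠ 0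
instance (e : Int) (n : Int) : Decidable (Pre_wiener_attack e n) := by unfold Pre_wiener_attack; infer_instance
def pvWitness_wiener_attack : Int × Int := (17, 6)

-- For n == 0 A raises IndexError while B's prefix loop has nothing to iterate and returns None.
def Raises_wiener_attack (e : Int) (n : Int) : Prop := n = 0
instance (e : Int) (n : Int) : Decidable (Raises_wiener_attack e n) := by unfold Raises_wiener_attack; infer_instance
def pvRaiseWitness_wiener_attack : Int × Int := (17, 0)
def pvRaiseWitnessOut_wiener_attack : Option Int := none

def Spec_wiener_attack (e : Int) (n : Int) (out : Option Int) : Prop := out = wiener_attack_alt e n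
instance (e : Int) (n : Int) (out : Option Int) : Decidable (Spec_wiener_attack e n out) := by unfold Spec_wiener_attack; infer_instance

-- ===== CLAIM =====
def Claim_equal_wiener_attack : Prop := ∀ (e : Int) (n : Int), Dom_wiener_attack e n → Pre_wiener_attack e n → Spec_wiener_attack e n (wiener_attack e n)
def Claim_raises_wiener_attack : Prop := (∀ (e : Int) (n : Int), Dom_wiener_attack e n → Raises_wiener_attack e n → ¬ Pre_wiener_attack e n) ∧ (Dom_wiener_attack (pvRaiseWitness_wiener_attack.1) (pvRaiseWitness_wiener_attack.2) ∧ Raises_wiener_attack (pvRaiseWitness_wiener_attack.1) (pvRaiseWitness_wiener_attack.2) ∧ wiener_attack_alt (pvRaiseWitness_wiener_attack.1) (pvRaiseWitness_wiener_attack.2) = pvRaiseWitnessOut_wiener_attack)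

-- ===== LEMMAS AND PROOFS =====

theorem cfB_eq_cfA (num den : Int) : cfB num den = cfA num den := by
  by_cases h : den = 0
  · rw [cfB.eq_def, cfA.eq_def]; simp [h]
  · rw [cfB.eq_def, cfA.eq_def]
    simp only [h, dite_false]
    rw [cfB_eq_cfA]
termination_by den.natAbs
decreasing_by exact pvEuclidStep_lt num den h

-- the generic forward convergent recurrence the A-side generator computes
def convG : List Int → Int → Int → Int → Int → List (Int × Int)
  | [], _, _, _, _ => []
  | a :: t, h1, h2, k1, k2 =>
    (a * h1 + h2, a * k1 + k2) :: convG t (a * h1 + h2) h1 (a * k1 + k2) k1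

theorem convRestA_eq_convG (cf : List Int) : ∀ n1 d1 n0 d0,
    convRestA cf n1 d1 n0 d0 = convG cf n1 n0 d1 d0 := by
  induction cf with
  | nil => intro _ _ _ _; rfl
  | cons a t ih => intro n1 d1 n0 d0; simp [convRestA, convG, ih]

theorem convA_eq_convG (cf : List Int) : convA cf = convG cf 1 0 0 1 := by
  match cf with
  | [] => rfl
  | [a0] => simp [convA, convG]
  | a0 :: a1 :: rest => simp [convA, convG, convRestA_eq_convG]

-- continuant identity: back substitution is linear with the forward state as coefficients
theorem scanB_eq_scanA (e n : Int) : ∀ (rest rev : List Int) (h1 h2 k1 k2 : Int),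
    (∀ k d, backB rev k d = (k * h1 + d * h2, k * k1 + d * k2)) →
    scanB e n rev rest = scanA e n (convG rest h1 h2 k1 k2) := by
  intro rest
  induction rest with
  | nil => intro rev h1 h2 k1 k2 _; rfl
  | cons a t ih =>
    intro rev h1 h2 k1 k2 hinv
    have hI : ∀ k d, backB (a :: rev) k d =
        (k * (a * h1 + h2) + d * h1, k * (a * k1 + k2) + d * k1) := by
      intro k d
      simp only [backB, hinv, Prod.mk.injEq]
      constructor <;> ring
    have hkd : backB rev a 1 = (a * h1 + h2, a * k1 + k2) := by
      rw [hinv]; simp only [Prod.mk.injEq]; constructor <;> ring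
    have hrec := ih (a :: rev) (a * h1 + h2) h1 (a * k1 + k2) k1 hI
    have hperf : ∀ dd : Int, (0 ≤ dd ∧ isPerfectSquareA dd = true) ↔
        (0 ≤ dd ∧ ((Nat.sqrt dd.toNat : Int) * (Nat.sqrt dd.toNat : Int) = dd)) := by
      intro dd
      unfold isPerfectSquareA
      by_cases h : dd < 0
      · simp only [if_pos h]
        constructor <;> (rintro ⟨ha, hb⟩; omega)
      · simp [h]
    simp only [scanB, convG, scanA, hkd, hrec]
    split_ifs with hA hB hC hD hE hF <;> try rfl
    all_goals simp_all
    all_goals (exfalso; (try obtain ⟨hx, hy⟩ := ‹_ ∧ _›); linarith)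

-- ===== VERDICT =====
theorem wiener_attack_spec : Claim_equal_wiener_attack := by
  intro e n _ _
  unfold Spec_wiener_attack wiener_attack wiener_attack_alt
  rw [cfB_eq_cfA, convA_eq_convG,
    scanB_eq_scanA e n (cfA e n) [] 1 0 0 1 (by intro k d; simp [backB])]

@[simp] theorem wiener_attack_raises : Claim_raises_wiener_attack := by
  unfold Claim_raises_wiener_attack
  refine ⟨fun e n _ hr hp => hp hr, by decide, by decide, ?_⟩
  show wiener_attack_alt 17 0 = none
  unfold wiener_attack_alt
  rw [cfB.eq_def]
  simp [scanB]
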